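-- pv_equiv track=rewrite | github.com/eouinht/RacAi | A2C_associate/baseline.py | _categorize_ues
-- ===== SOURCE A (Python) =====
-- def _categorize_ues(state):
--     """Nhóm UE thành stable/ho/new theo trạng thái đã có trong state.K"""
--     stable, ho, new = [], [], []
--     for ue in state["UE_requests"]:
--         if int(ue.get("active", 0)) != 1:
--             continue
--         if int(ue.get("is_ho_candidate", 0)) == 1:
--             ho.append(ue)
--         elif int(ue.get("is_new", 0)) == 1:
--             new.append(ue)
--         else:
--             stable.append(ue)
--     return stable, ho, new
-- ===== SOURCE B (Python) =====
-- def _categorize_ues(state):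
--     """Same categorization, expressed as three filtered comprehensions over the requests."""
--     ues = state["UE_requests"]
--     def flag(ue, key):
--         return int(ue.get(key, 0)) == 1
--     stable = [u for u in ues if flag(u, "active") and not flag(u, "is_ho_candidate") and not flag(u, "is_new")]
--     ho = [u for u in ues if flag(u, "active") and flag(u, "is_ho_candidate")]
--     new = [u for u in ues if flag(u, "active") and not flag(u, "is_ho_candidate") and flag(u, "is_new")]
--     return stable, ho, new
-- ===== Notes on version B (the rewrite author's own statement) =====
-- stated objective: idiomatic
-- what changed: Replaces the single accumulator loop with three branches by three independent filtered comprehensions (declarative per-bucket predicates) instead of one pass maintaining three lists.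
import Mathlib
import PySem

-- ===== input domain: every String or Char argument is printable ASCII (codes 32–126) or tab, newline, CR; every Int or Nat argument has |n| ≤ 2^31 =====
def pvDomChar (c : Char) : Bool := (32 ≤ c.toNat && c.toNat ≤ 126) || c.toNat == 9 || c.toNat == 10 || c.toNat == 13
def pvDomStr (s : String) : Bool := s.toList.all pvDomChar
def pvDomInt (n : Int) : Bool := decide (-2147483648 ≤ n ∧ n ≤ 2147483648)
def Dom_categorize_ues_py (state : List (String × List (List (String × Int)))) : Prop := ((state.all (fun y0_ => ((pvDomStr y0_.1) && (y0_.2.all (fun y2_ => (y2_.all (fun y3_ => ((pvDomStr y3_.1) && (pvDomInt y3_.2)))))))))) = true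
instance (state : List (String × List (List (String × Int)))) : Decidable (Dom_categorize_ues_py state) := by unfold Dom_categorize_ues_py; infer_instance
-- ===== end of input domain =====

-- B replaces the single three-way bucketing loop by three independent filtered comprehensions (idiomatic, same cost).

-- ===== PORT A =====
-- single pass, three accumulators, appending at the back exactly as the Python loop does
def categorize_ues_py (state : List (String × List (List (String × Int)))) : List (List (List (String × Int))) :=
  match (PySem.Dict.mk state).get? "UE_requests" with
  | none => []  -- KeyError in Python; excluded by Pre_
  | some ues =>
    let r := ues.foldl (fun (acc : List (List (String × Int)) × List (List (String × Int)) × List (List (String × Int))) ue =>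
      if ¬ ((PySem.Dict.mk ue).getD "active" 0 = 1) then acc
      else if (PySem.Dict.mk ue).getD "is_ho_candidate" 0 = 1 then (acc.1, acc.2.1 ++ [ue], acc.2.2)
      else if (PySem.Dict.mk ue).getD "is_new" 0 = 1 then (acc.1, acc.2.1, acc.2.2 ++ [ue])
      else (acc.1 ++ [ue], acc.2.1, acc.2.2)) ([], [], [])
    [r.1, r.2.1, r.2.2]

-- ===== PORT B =====
def pvFlag (ue : List (String × Int)) (key : String) : Bool :=
  (PySem.Dict.mk ue).getD key 0 == 1

def categorize_ues_py_alt (state : List (String × List (List (String × Int)))) : List (List (List (String × Int))) :=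
  match (PySem.Dict.mk state).get? "UE_requests" with
  | none => []  -- KeyError in Python; excluded by Pre_
  | some ues =>
    [ues.filter (fun u => pvFlag u "active" && !pvFlag u "is_ho_candidate" && !pvFlag u "is_new"),
     ues.filter (fun u => pvFlag u "active" && pvFlag u "is_ho_candidate"),
     ues.filter (fun u => pvFlag u "active" && !pvFlag u "is_ho_candidate" && pvFlag u "is_new")]

-- ===== PRECONDITION & SPEC =====
-- Pre_ excludes exactly the inputs where Python raises KeyError: no "UE_requests" key in state.
def Pre_categorize_ues_py (state : List (String × List (List (String × Int)))) : Prop :=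
  ((PySem.Dict.mk state).get? "UE_requests").isSome = true
instance (state : List (String × List (List (String × Int)))) : Decidable (Pre_categorize_ues_py state) := by unfold Pre_categorize_ues_py; infer_instance
def pvWitness_categorize_ues_py : (List (String × List (List (String × Int)))) :=
  [("UE_requests", [[("active", 1), ("is_new", 1)], [("active", 0)]])]

def Spec_categorize_ues_py (state : List (String × List (List (String × Int)))) (out : List (List (List (String × Int)))) : Prop := out = categorize_ues_py_alt state
instance (state : List (String × List (List (String × Int)))) (out : List (List (List (String × Int)))) : Decidable (Spec_categorize_ues_py state out) := by unfold Spec_categorize_ues_py; infer_instance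

-- ===== CLAIM (what is proved, stated in full; the proofs are below) =====
def Claim_equal_categorize_ues_py : Prop := ∀ (state : List (String × List (List (String × Int)))), Dom_categorize_ues_py state → Pre_categorize_ues_py state → Spec_categorize_ues_py state (categorize_ues_py state)

-- ===== LEMMAS AND PROOFS =====

abbrev pvTri := List (List (String × Int)) × List (List (String × Int)) × List (List (String × Int))

def pvStepA (acc : pvTri) (ue : List (String × Int)) : pvTri :=
  if ¬ ((PySem.Dict.mk ue).getD "active" 0 = 1) then acc
  else if (PySem.Dict.mk ue).getD "is_ho_candidate" 0 = 1 then (acc.1, acc.2.1 ++ [ue], acc.2.2)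
  else if (PySem.Dict.mk ue).getD "is_new" 0 = 1 then (acc.1, acc.2.1, acc.2.2 ++ [ue])
  else (acc.1 ++ [ue], acc.2.1, acc.2.2)

theorem pv_fold_eq (ues : List (List (String × Int))) (s h n : List (List (String × Int))) :
    ues.foldl pvStepA (s, h, n)
    = (s ++ ues.filter (fun u => pvFlag u "active" && !pvFlag u "is_ho_candidate" && !pvFlag u "is_new"),
       h ++ ues.filter (fun u => pvFlag u "active" && pvFlag u "is_ho_candidate"),
       n ++ ues.filter (fun u => pvFlag u "active" && !pvFlag u "is_ho_candidate" && pvFlag u "is_new")) := by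
  induction ues generalizing s h n with
  | nil => simp
  | cons ue rest ih =>
    rw [List.foldl_cons]
    by_cases ha : (PySem.Dict.mk ue).getD "active" 0 = 1
    · by_cases hh : (PySem.Dict.mk ue).getD "is_ho_candidate" 0 = 1
      · rw [show pvStepA (s, h, n) ue = (s, h ++ [ue], n) from by simp [pvStepA, ha, hh], ih]
        simp [List.filter_cons, pvFlag, ha, hh]
      · by_cases hn : (PySem.Dict.mk ue).getD "is_new" 0 = 1
        · rw [show pvStepA (s, h, n) ue = (s, h, n ++ [ue]) from by simp [pvStepA, ha, hh, hn], ih]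
          simp [List.filter_cons, pvFlag, ha, hh, hn]
        · rw [show pvStepA (s, h, n) ue = (s ++ [ue], h, n) from by simp [pvStepA, ha, hh, hn], ih]
          simp [List.filter_cons, pvFlag, ha, hh, hn]
    · rw [show pvStepA (s, h, n) ue = (s, h, n) from by simp [pvStepA, ha], ih]
      simp [List.filter_cons, pvFlag, ha]

-- ===== VERDICT (by name: the statement is the Claim_ definition above) =====
theorem categorize_ues_py_spec : Claim_equal_categorize_ues_py := by
  intro state _ hpre
  unfold Spec_categorize_ues_py categorize_ues_py categorize_ues_py_alt
  cases hget : (PySem.Dict.mk state).get? "UE_requests" with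
  | none => simp [Pre_categorize_ues_py, hget] at hpre
  | some ues =>
    show ([(List.foldl pvStepA ([], [], []) ues).1,
           (List.foldl pvStepA ([], [], []) ues).2.1,
           (List.foldl pvStepA ([], [], []) ues).2.2] : List (List (List (String × Int)))) = _
    rw [pv_fold_eq]
    rfl
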